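-- pv_equiv track=rewrite | github.com/Dev-Guccin/BaekjoonHub | 백준/Silver/2504. 괄호의 값/괄호의 값.py | dung
-- ===== SOURCE A (Python) =====
-- def dung(total, S, start, end):
--
--     s = []
--     si = start
--
--     if start == end:
--         return 1
--
--     for i in range(start, end):
--         if S[i] == "]":
--             if len(s) != 0 and s[-1] == '[':
--                 s.pop()
--             else:
--                 return -1
--         elif S[i] == ')':
--             if len(s) != 0 and s[-1] == '(':
--                 s.pop()
--             else:
--                 return -1
--         else:
--             s.append(S[i])
--         if len(s) == 0:
--             tmp = calc(S, si, i+1)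
--             total += tmp
--             si = i+1
--     return total
--
-- def calc(S, si, i):
--     if S[si] == '(':
--         return 2 * dung(0, S, si+1, i-1)
--     if S[si] == '[':
--         return 3 * dung(0, S, si+1, i-1)
-- ===== SOURCE B (Python) =====
-- def dung(total, S, start, end):
--     # Single pass: a running product of enclosing bracket multipliers replaces
--     # the recursive re-scan of each completed group.
--     if start == end:
--         return 1
--     ans = total
--     pending = 0
--     mult = 1
--     stack = []
--     prev = ''
--     for i in range(start, end):
--         c = S[i]
--         if c == ')':
--             if not stack or stack[-1] != '(':
--                 return -1
--             if prev == '(':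
--                 pending += mult
--             stack.pop()
--             mult //= 2
--             if not stack:
--                 ans += pending
--                 pending = 0
--         elif c == ']':
--             if not stack or stack[-1] != '[':
--                 return -1
--             if prev == '[':
--                 pending += mult
--             stack.pop()
--             mult //= 3
--             if not stack:
--                 ans += pending
--                 pending = 0
--         else:
--             stack.append(c)
--             if c == '(':
--                 mult *= 2
--             elif c == '[':
--                 mult *= 3
--         prev = c
--     return ans
-- ===== Notes on version B (the rewrite author's own statement) =====
-- stated objective: faster
-- what changed: A re-scans every completed bracket group with a recursive helper (dung/calc mutual recursion); B makes a single left-to-right pass keeping a running product of the enclosing bracket multipliers, committing the pending group value whenever the stack empties, so no index range is ever read twice.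
-- outside the precondition, e.g. on dung(0, ']', 0, 5): A returns -1, B returns -1
import Mathlib
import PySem

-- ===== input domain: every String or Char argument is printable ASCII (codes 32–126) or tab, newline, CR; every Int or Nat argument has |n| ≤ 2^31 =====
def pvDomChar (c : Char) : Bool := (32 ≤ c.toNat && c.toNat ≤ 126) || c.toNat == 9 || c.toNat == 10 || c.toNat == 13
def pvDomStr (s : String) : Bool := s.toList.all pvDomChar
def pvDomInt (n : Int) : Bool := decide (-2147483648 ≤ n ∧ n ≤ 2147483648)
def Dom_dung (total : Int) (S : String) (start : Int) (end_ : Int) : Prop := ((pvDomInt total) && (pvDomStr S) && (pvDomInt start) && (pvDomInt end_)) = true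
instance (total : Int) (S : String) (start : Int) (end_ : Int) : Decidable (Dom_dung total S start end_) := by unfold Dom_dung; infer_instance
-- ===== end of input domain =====

-- B replaces A's recursive re-scan of every completed bracket group by one linear pass
-- that keeps a running product of the enclosing multipliers (objective: faster).

-- ===== PORT A =====
-- S[i] with Python's negative-index rule; the default '?' is only reached where the
-- Python raises IndexError, which Pre_dung excludes.
def pg (S : String) (i : Int) : Char := (PySem.Str.pyGet? S i).getD '?'

-- A's recursion (dung → calc → dung) is guarded by fuel for totality only: each nested
-- call is on an interval shorter by ≥ 2, so fuel (end_-start).toNat + 1 never runs out.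
mutual
def dungF (fuel : Nat) (total : Int) (S : String) (start : Int) (end_ : Int) : Int :=
  match fuel with
  | 0 => 0
  | fuel + 1 =>
    if start = end_ then 1
    else dungLoop fuel S end_ ((end_ - start).toNat) start [] start total
termination_by (fuel, 0, 0)

-- calc(S, si, j); Python returns None on other chars — unreachable from dung's calls
-- (the group opener is always '(' or '['); 0 is a placeholder there.
def calcF (fuel : Nat) (S : String) (si : Int) (j : Int) : Int :=
  if pg S si = '(' then 2 * dungF fuel 0 S (si + 1) (j - 1)
  else if pg S si = '[' then 3 * dungF fuel 0 S (si + 1) (j - 1)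
  else 0
termination_by (fuel, 1, 0)

-- the for-loop: n counts the remaining iterations, i the current index; s is the stack
-- (top = head), si / total as in A.  After a push the stack is nonempty, so A's
-- trailing 'if len(s)==0' check only fires in the two pop branches.
def dungLoop (fuel : Nat) (S : String) (end_ : Int) (n : Nat) (i : Int)
    (s : List Char) (si : Int) (total : Int) : Int :=
  match n with
  | 0 => total
  | n + 1 =>
    if pg S i = ']' then
      if s.head? = some '[' then
        if s.tail = [] then
          dungLoop fuel S end_ n (i + 1) s.tail (i + 1) (total + calcF fuel S si (i + 1))
        else dungLoop fuel S end_ n (i + 1) s.tail si total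
      else -1
    else if pg S i = ')' then
      if s.head? = some '(' then
        if s.tail = [] then
          dungLoop fuel S end_ n (i + 1) s.tail (i + 1) (total + calcF fuel S si (i + 1))
        else dungLoop fuel S end_ n (i + 1) s.tail si total
      else -1
    else
      dungLoop fuel S end_ n (i + 1) (pg S i :: s) si total
termination_by (fuel, 2, n)
end

def dung (total : Int) (S : String) (start : Int) (end_ : Int) : Int :=
  dungF ((end_ - start).toNat + 1) total S start end_

-- ===== PORT B =====
-- Source B's loop: stack of raw chars, mult = product of multipliers of open brackets,
-- pending = value of the group open since the stack was last empty, ans = committed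
-- value, prev = previous character ('?' stands for Source B's initial '', which like '?'
-- is never equal to '(' or '[').
def dungAltLoop (S : String) (n : Nat) (i : Int) (stk : List Char)
    (mult : Int) (pending : Int) (ans : Int) (prev : Char) : Int :=
  match n with
  | 0 => ans
  | n + 1 =>
    let c := pg S i
    if c = ')' then
      if stk.head? = some '(' then
        let pending2 := if prev = '(' then pending + mult else pending
        let mult2 := PySem.Int.floordiv mult 2
        if stk.tail = [] then dungAltLoop S n (i + 1) stk.tail mult2 0 (ans + pending2) c
        else dungAltLoop S n (i + 1) stk.tail mult2 pending2 ans c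
      else -1
    else if c = ']' then
      if stk.head? = some '[' then
        let pending2 := if prev = '[' then pending + mult else pending
        let mult2 := PySem.Int.floordiv mult 3
        if stk.tail = [] then dungAltLoop S n (i + 1) stk.tail mult2 0 (ans + pending2) c
        else dungAltLoop S n (i + 1) stk.tail mult2 pending2 ans c
      else -1
    else
      let mult2 := if c = '(' then mult * 2 else if c = '[' then mult * 3 else mult
      dungAltLoop S n (i + 1) (c :: stk) mult2 pending ans c

def dung_alt (total : Int) (S : String) (start : Int) (end_ : Int) : Int :=
  if start = end_ then 1
  else dungAltLoop S ((end_ - start).toNat) start [] 1 0 total '?'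

-- ===== PRECONDITION & SPEC =====
-- Pre_ excludes scan windows that leave the string (there Python's S[i] raises
-- IndexError; on a few such inputs A happens to return -1 before reaching the bad
-- index — B returns -1 there too, see the cite).
def Pre_dung (total : Int) (S : String) (start : Int) (end_ : Int) : Prop :=
  start < end_ → (-(S.length : Int) ≤ start ∧ end_ ≤ (S.length : Int))
instance (total : Int) (S : String) (start : Int) (end_ : Int) : Decidable (Pre_dung total S start end_) := by unfold Pre_dung; infer_instance

def pvWitness_dung : Int × String × Int × Int := (0, "(()[[]])([])", 0, 12)

def Spec_dung (total : Int) (S : String) (start : Int) (end_ : Int) (out : Int) : Prop := out = dung_alt total S start end_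
instance (total : Int) (S : String) (start : Int) (end_ : Int) (out : Int) : Decidable (Spec_dung total S start end_ out) := by unfold Spec_dung; infer_instance

-- ===== CLAIM (what is proved, stated in full; the proofs are below) =====
def Claim_equal_dung : Prop := ∀ (total : Int) (S : String) (start : Int) (end_ : Int), Dom_dung total S start end_ → Pre_dung total S start end_ → Spec_dung total S start end_ (dung total S start end_)

-- ===== LEMMAS AND PROOFS =====

-- abstract state of B's loop: dead = early 'return -1'
inductive BSt where
  | dead
  | run (stk : List Char) (mult : Int) (pending : Int) (ans : Int) (prev : Char)
deriving DecidableEq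

def fac (c : Char) : Int := if c = '(' then 2 else if c = '[' then 3 else 1

def wgt : List Char → Int
  | [] => 1
  | c :: s => fac c * wgt s

def bstep (st : BSt) (c : Char) : BSt :=
  match st with
  | .dead => .dead
  | .run stk mult pending ans prev =>
    if c = ')' then
      if stk.head? = some '(' then
        let pending2 := if prev = '(' then pending + mult else pending
        let mult2 := PySem.Int.floordiv mult 2
        if stk.tail = [] then .run [] mult2 0 (ans + pending2) c
        else .run stk.tail mult2 pending2 ans c
      else .dead
    else if c = ']' then
      if stk.head? = some '[' then
        let pending2 := if prev = '[' then pending + mult else pending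
        let mult2 := PySem.Int.floordiv mult 3
        if stk.tail = [] then .run [] mult2 0 (ans + pending2) c
        else .run stk.tail mult2 pending2 ans c
      else .dead
    else
      .run (c :: stk) (if c = '(' then mult * 2 else if c = '[' then mult * 3 else mult)
        pending ans c

def bres : BSt → Int
  | .dead => -1
  | .run _ _ _ a _ => a

def chars (S : String) (a b : Int) : List Char := (PySem.List.pyRange a b 1).map (pg S)


lemma chars_empty (S : String) {a b : Int} (h : b ≤ a) : chars S a b = [] := by
  simp [chars, PySem.List.pyRange_one_eq_nil h]

lemma chars_cons (S : String) {a b : Int} (h : a < b) :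
    chars S a b = pg S a :: chars S (a+1) b := by
  simp [chars, PySem.List.pyRange_one_cons h]

lemma chars_snoc (S : String) {a b : Int} (h : a < b) :
    chars S a b = chars S a (b-1) ++ [pg S (b-1)] := by
  have h1 : a ≤ b - 1 := by omega
  have h2 := PySem.List.pyRange_one_succ_right (a := a) (b := b - 1) h1
  simp only [chars]
  rw [show b = (b-1)+1 by ring, h2]
  simp

lemma foldl_bstep_dead (cs : List Char) : List.foldl bstep .dead cs = .dead := by
  induction cs with
  | nil => rfl
  | cons c cs ih => simpa [bstep] using ih

def Pinv : BSt → Prop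
  | .dead => True
  | .run s m p _ _ => m = wgt s ∧ (s = [] → p = 0)

lemma fdiv_cancel (f w : Int) (hf : 0 < f) : PySem.Int.floordiv (f * w) f = w := by
  rw [PySem.Int.floordiv_eq_ediv_of_pos hf, Int.mul_ediv_cancel_left _ (by omega)]

lemma pinv_bstep {st : BSt} (h : Pinv st) (c : Char) : Pinv (bstep st c) := by
  cases st with
  | dead => trivial
  | run s m p a v =>
    obtain ⟨hm, hp⟩ := h
    unfold bstep
    by_cases h1 : c = ')'
    · simp only [h1, if_pos rfl]
      by_cases h2 : s.head? = some '('
      · obtain ⟨t, ht⟩ : ∃ t, s = '(' :: t := by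
          cases s with
          | nil => simp at h2
          | cons x t => simp at h2; exact ⟨t, by rw [h2]⟩
        subst ht
        have hw : m = 2 * wgt t := by simpa [wgt, fac] using hm
        by_cases h3 : t = [] <;>
          simp [h2, h3, Pinv, hw, fdiv_cancel 2 (wgt t) (by norm_num)] <;> simp [h3, wgt]
      · simp [h2, Pinv]
    · by_cases h2 : c = ']'
      · simp only [h1, h2, if_neg, if_pos rfl, reduceIte]
        by_cases h3 : s.head? = some '['
        · obtain ⟨t, ht⟩ : ∃ t, s = '[' :: t := by
            cases s with
            | nil => simp at h3
            | cons x t => simp at h3; exact ⟨t, by rw [h3]⟩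
          subst ht
          have hw : m = 3 * wgt t := by simpa [wgt, fac] using hm
          by_cases h4 : t = [] <;>
            simp [h3, h4, Pinv, hw, fdiv_cancel 3 (wgt t) (by norm_num)] <;> simp [h4, wgt]
        · simp [h3, Pinv]
      · simp only [h1, h2, reduceIte]
        refine ⟨?_, by simp⟩
        simp only [wgt, fac, hm]
        split_ifs <;> ring

lemma pinv_foldl {st : BSt} (h : Pinv st) (cs : List Char) : Pinv (List.foldl bstep st cs) := by
  induction cs generalizing st with
  | nil => exact h
  | cons c cs ih => exact ih (pinv_bstep h c)

lemma altLoop_eq (S : String) : ∀ (n : Nat) (i : Int) (stk : List Char) (m p a : Int) (v : Char),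
    dungAltLoop S n i stk m p a v
      = bres (List.foldl bstep (.run stk m p a v) (chars S i (i + n))) := by
  intro n
  induction n with
  | zero =>
    intro i stk m p a v
    rw [show i + ((0:Nat):Int) = i by simp, chars_empty S le_rfl]
    simp [dungAltLoop, bres]
  | succ n ih =>
    intro i stk m p a v
    have hc : chars S i (i + ((n+1 : Nat) : Int)) = pg S i :: chars S (i+1) ((i+1) + (n:Nat)) := by
      rw [chars_cons S (by push_cast; omega)]
      congr 2
      push_cast; ring
    rw [hc]
    simp only [dungAltLoop, List.foldl_cons, bstep]
    by_cases h1 : pg S i = ')'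
    · by_cases h2 : stk.head? = some '('
      · by_cases h3 : stk.tail = [] <;> simp [h1, h2, h3, ih]
      · simp [h1, h2, foldl_bstep_dead, bres]
    · by_cases h2 : pg S i = ']'
      · by_cases h3 : stk.head? = some '['
        · by_cases h4 : stk.tail = [] <;> simp [h1, h2, h3, h4, ih]
        · simp [h1, h2, h3, foldl_bstep_dead, bres]
      · simp [h1, h2, ih]

lemma alt_eq (S : String) (total start end_ : Int) (h : start ≠ end_) :
    dung_alt total S start end_
      = bres (List.foldl bstep (.run [] 1 0 total '?') (chars S start end_)) := by
  rw [dung_alt, if_neg h, altLoop_eq]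
  congr 2
  by_cases hlt : start < end_
  · congr 1; omega
  · rw [chars_empty S (by omega), chars_empty S (by omega)]

lemma init_pinv : Pinv (BSt.run [] 1 0 0 '?') := by simp [Pinv, wgt]

lemma bstep_run_nil {st : BSt} {c : Char} {m p a : Int} {v : Char}
    (h : bstep st c = .run [] m p a v) : c = ')' ∨ c = ']' := by
  cases st with
  | dead => simp [bstep] at h
  | run s m0 p0 a0 v0 =>
    by_cases h1 : c = ')'
    · exact Or.inl h1
    · by_cases h2 : c = ']'
      · exact Or.inr h2
      · simp [bstep, h1, h2] at h

lemma last_of_run_nil (S : String) {a b : Int} (hab : a < b) {m p a' : Int} {v : Char}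
    (h : List.foldl bstep (BSt.run [] 1 0 0 '?') (chars S a b) = .run [] m p a' v) :
    pg S (b-1) = ')' ∨ pg S (b-1) = ']' := by
  rw [chars_snoc S hab, List.foldl_append] at h
  exact bstep_run_nil h

lemma sim (S : String) (start end_ : Int) (fuel : Nat)
    (HIH : ∀ si i : Int, start ≤ si → si < i → i < end_ →
      dungF fuel 0 S (si+1) i = dung_alt 0 S (si+1) i) :
    ∀ (n : Nat) (i si tot mult pending : Int) (s : List Char) (prev : Char),
      ((n : Int) = end_ - i) → start ≤ si → si ≤ i →
      (s = [] → si = i ∧ mult = 1 ∧ pending = 0) →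
      (s ≠ [] → ∃ s' m' p' a' pv', s = s' ++ [pg S si] ∧ si < i ∧ prev = pg S (i-1) ∧
        List.foldl bstep (BSt.run [] 1 0 0 '?') (chars S (si+1) i) = BSt.run s' m' p' a' pv' ∧
        mult = fac (pg S si) * m' ∧ pending = fac (pg S si) * (a' + p') ∧
        (s' ≠ [] → pv' = prev)) →
      dungLoop fuel S end_ n i s si tot
        = bres (List.foldl bstep (BSt.run s mult pending tot prev) (chars S i end_)) := by
  intro n
  induction n with
  | zero =>
    intro i si tot mult pending s prev h1 h2 h3 h4 h5
    rw [dungLoop, chars_empty S (by omega : end_ ≤ i)]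
    simp [bres]
  | succ n ih =>
    intro i si tot mult pending s prev h1 h2 h3 h4 h5
    have hi : i < end_ := by push_cast at h1; omega
    have hn : (n : Int) = end_ - (i+1) := by push_cast at h1 ⊢; omega
    rw [chars_cons S hi, List.foldl_cons, dungLoop]
    by_cases hc1 : pg S i = ']'
    · rw [if_pos hc1]
      by_cases hh : s.head? = some '['
      · rw [if_pos hh]
        by_cases ht : s.tail = []
        · rw [if_pos ht]
          have hs1 : s = ['['] := by
            cases s with
            | nil => simp at hh
            | cons x t =>
              simp only [List.head?_cons, Option.some.injEq] at hh
              simp only [List.tail_cons] at ht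
              rw [hh, ht]
          subst hs1
          obtain ⟨s', m', p', a', pv', hsplit, hsii, hprev, hF, hm, hp, hpv⟩ := h5 (by simp)
          obtain ⟨ho, hs'⟩ : pg S si = '[' ∧ s' = [] := by
            cases s' with
            | nil =>
              refine ⟨?_, rfl⟩
              simp only [List.nil_append, List.cons.injEq, and_true] at hsplit
              exact hsplit.symm
            | cons x t =>
              exfalso
              have hl := congrArg List.length hsplit
              simp at hl
          subst hs'
          have hpin := pinv_foldl init_pinv (chars S (si+1) i)
          rw [hF] at hpin
          have hm'1 : m' = 1 := by simpa [Pinv, wgt] using hpin.1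
          have hp'0 : p' = 0 := hpin.2 rfl
          have hfo : fac (pg S si) = 3 := by rw [ho]; rfl
          have hmv : mult = 3 := by rw [hm, hm'1, hfo]; ring
          have hcalc : calcF fuel S si (i+1) = 3 * dung_alt 0 S (si+1) i := by
            rw [calcF, if_neg (by rw [ho]; decide), if_pos ho, show i + 1 - 1 = i by ring, HIH si i h2 hsii hi]
          have key : tot + calcF fuel S si (i+1)
              = tot + (if prev = '[' then pending + mult else pending) := by
            rw [hcalc]
            by_cases hii : si + 1 = i
            · have hF0 : List.foldl bstep (BSt.run [] 1 0 0 '?') (chars S (si+1) i)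
                  = BSt.run [] 1 0 0 '?' := by rw [chars_empty S (by omega)]; rfl
              rw [hF0] at hF
              have ha0 : a' = 0 := by cases hF; rfl
              have hprevo : prev = '[' := by rw [hprev, show i - 1 = si by omega, ho]
              rw [dung_alt, if_pos hii, hprevo, if_pos rfl, hp, hmv, ha0, hp'0, hfo]
              ring
            · have hcl := last_of_run_nil S (by omega : si + 1 < i) hF
              have hprevne : ¬ prev = '[' := by
                rw [hprev]; rcases hcl with h | h <;> rw [h] <;> decide
              rw [alt_eq S 0 (si+1) i (by omega), hF]
              simp only [bres]
              rw [if_neg hprevne, hp, hp'0, hfo]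
              ring

          have hST : bstep (BSt.run ['['] mult pending tot prev) (pg S i)
              = BSt.run [] 1 0 (tot + (if prev = '[' then pending + mult else pending)) (pg S i) := by
            simp [bstep, hc1, hmv, (by decide : PySem.Int.floordiv (3 : Int) 3 = 1)]
          rw [hST, key]
          apply ih (i+1) (i+1) _ 1 0 [] (pg S i) hn (by omega) (by omega)
          · intro _; exact ⟨rfl, rfl, rfl⟩
          · intro h; simp at h
        · rw [if_neg ht]
          obtain ⟨s2, hs2⟩ : ∃ s2, s = '[' :: s2 := by
            cases s with
            | nil => simp at hh
            | cons x t => simp only [List.head?_cons, Option.some.injEq] at hh; exact ⟨t, by rw [hh]⟩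
          subst hs2
          simp only [List.tail_cons] at ht ⊢
          obtain ⟨s', m', p', a', pv', hsplit, hsii, hprev, hF, hm, hp, hpv⟩ := h5 (by simp)
          obtain ⟨s'', hx, hs2'⟩ : ∃ s'', s' = '[' :: s'' ∧ s2 = s'' ++ [pg S si] := by
            cases s' with
            | nil =>
              exfalso
              simp only [List.nil_append, List.cons.injEq] at hsplit
              exact ht hsplit.2
            | cons x t =>
              simp only [List.cons_append, List.cons.injEq] at hsplit
              exact ⟨t, by rw [hsplit.1], hsplit.2⟩
          subst hx
          have hpin := pinv_foldl init_pinv (chars S (si+1) i)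
          rw [hF] at hpin
          have hm'2 : m' = 3 * wgt s'' := by simpa [Pinv, wgt, fac] using hpin.1
          have hpv' : pv' = prev := hpv (by simp)
          have hST : bstep (BSt.run ('[' :: s2) mult pending tot prev) (pg S i)
              = BSt.run s2 (PySem.Int.floordiv mult 3)
                  (if prev = '[' then pending + mult else pending) tot (pg S i) := by
            simp [bstep, hc1, ht]
          have hmd : PySem.Int.floordiv mult 3 = fac (pg S si) * wgt s'' := by
            rw [hm, hm'2, show fac (pg S si) * (3 * wgt s'') = 3 * (fac (pg S si) * wgt s'') by ring,
              fdiv_cancel 3 _ (by norm_num)]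
          have hmd' : PySem.Int.floordiv m' 3 = wgt s'' := by
            rw [hm'2, fdiv_cancel 3 _ (by norm_num)]
          rw [hST, hmd]
          apply ih (i+1) si tot _ _ _ (pg S i) hn h2 (by omega)
          · intro h; exact absurd h ht
          · intro _
            have hF' : List.foldl bstep (BSt.run [] 1 0 0 '?') (chars S (si+1) (i+1))
                = bstep (BSt.run ('[' :: s'') m' p' a' pv') (pg S i) := by
              rw [chars_snoc S (by omega : si + 1 < i + 1), show i + 1 - 1 = i by ring,
                List.foldl_append, hF]
              rfl
            by_cases hnil : s'' = []
            · refine ⟨[], PySem.Int.floordiv m' 3, 0,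
                a' + (if prev = '[' then p' + m' else p'), pg S i,
                by simpa [hnil] using hs2', by omega, by simp, ?_, by rw [hmd'], ?_, by simp⟩
              · rw [hF']; simp [bstep, hc1, hnil, hpv']
              · by_cases hpc : prev = '[' <;> simp [hpc, hp, hm, hnil, wgt] <;> ring
            · refine ⟨s'', PySem.Int.floordiv m' 3,
                (if prev = '[' then p' + m' else p'), a', pg S i,
                hs2', by omega, by simp, ?_, by rw [hmd'], ?_, by simp [hnil]⟩
              · rw [hF']; simp [bstep, hc1, hnil, hpv']
              · by_cases hpc : prev = '[' <;> simp [hpc, hp, hm] <;> ring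
      · rw [if_neg hh]
        have hST : bstep (BSt.run s mult pending tot prev) (pg S i) = .dead := by
          simp [bstep, hc1, hh]
        rw [hST, foldl_bstep_dead]
        rfl
    · rw [if_neg hc1]
      by_cases hc2 : pg S i = ')'
      · rw [if_pos hc2]
        by_cases hh : s.head? = some '('
        · rw [if_pos hh]
          by_cases ht : s.tail = []
          · rw [if_pos ht]
            have hs1 : s = ['('] := by
              cases s with
              | nil => simp at hh
              | cons x t =>
                simp only [List.head?_cons, Option.some.injEq] at hh
                simp only [List.tail_cons] at ht
                rw [hh, ht]
            subst hs1
            obtain ⟨s', m', p', a', pv', hsplit, hsii, hprev, hF, hm, hp, hpv⟩ := h5 (by simp)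
            obtain ⟨ho, hs'⟩ : pg S si = '(' ∧ s' = [] := by
              cases s' with
              | nil =>
                refine ⟨?_, rfl⟩
                simp only [List.nil_append, List.cons.injEq, and_true] at hsplit
                exact hsplit.symm
              | cons x t =>
                exfalso
                have hl := congrArg List.length hsplit
                simp at hl
            subst hs'
            have hpin := pinv_foldl init_pinv (chars S (si+1) i)
            rw [hF] at hpin
            have hm'1 : m' = 1 := by simpa [Pinv, wgt] using hpin.1
            have hp'0 : p' = 0 := hpin.2 rfl
            have hfo : fac (pg S si) = 2 := by rw [ho]; rfl
            have hmv : mult = 2 := by rw [hm, hm'1, hfo]; ring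
            have hcalc : calcF fuel S si (i+1) = 2 * dung_alt 0 S (si+1) i := by
              rw [calcF, if_pos ho, show i + 1 - 1 = i by ring, HIH si i h2 hsii hi]
            have key : tot + calcF fuel S si (i+1)
                = tot + (if prev = '(' then pending + mult else pending) := by
              rw [hcalc]
              by_cases hii : si + 1 = i
              · have hF0 : List.foldl bstep (BSt.run [] 1 0 0 '?') (chars S (si+1) i)
                    = BSt.run [] 1 0 0 '?' := by rw [chars_empty S (by omega)]; rfl
                rw [hF0] at hF
                have ha0 : a' = 0 := by cases hF; rfl
                have hprevo : prev = '(' := by rw [hprev, show i - 1 = si by omega, ho]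
                rw [dung_alt, if_pos hii, hprevo, if_pos rfl, hp, hmv, ha0, hp'0, hfo]
                ring
              · have hcl := last_of_run_nil S (by omega : si + 1 < i) hF
                have hprevne : ¬ prev = '(' := by
                  rw [hprev]; rcases hcl with h | h <;> rw [h] <;> decide
                rw [alt_eq S 0 (si+1) i (by omega), hF]
                simp only [bres]
                rw [if_neg hprevne, hp, hp'0, hfo]
                ring

            have hST : bstep (BSt.run ['('] mult pending tot prev) (pg S i)
                = BSt.run [] 1 0 (tot + (if prev = '(' then pending + mult else pending)) (pg S i) := by
              simp [bstep, hc2, hmv, (by decide : PySem.Int.floordiv (2 : Int) 2 = 1)]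
            rw [hST, key]
            apply ih (i+1) (i+1) _ 1 0 [] (pg S i) hn (by omega) (by omega)
            · intro _; exact ⟨rfl, rfl, rfl⟩
            · intro h; simp at h
          · rw [if_neg ht]
            obtain ⟨s2, hs2⟩ : ∃ s2, s = '(' :: s2 := by
              cases s with
              | nil => simp at hh
              | cons x t => simp only [List.head?_cons, Option.some.injEq] at hh; exact ⟨t, by rw [hh]⟩
            subst hs2
            simp only [List.tail_cons] at ht ⊢
            obtain ⟨s', m', p', a', pv', hsplit, hsii, hprev, hF, hm, hp, hpv⟩ := h5 (by simp)
            obtain ⟨s'', hx, hs2'⟩ : ∃ s'', s' = '(' :: s'' ∧ s2 = s'' ++ [pg S si] := by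
              cases s' with
              | nil =>
                exfalso
                simp only [List.nil_append, List.cons.injEq] at hsplit
                exact ht hsplit.2
              | cons x t =>
                simp only [List.cons_append, List.cons.injEq] at hsplit
                exact ⟨t, by rw [hsplit.1], hsplit.2⟩
            subst hx
            have hpin := pinv_foldl init_pinv (chars S (si+1) i)
            rw [hF] at hpin
            have hm'2 : m' = 2 * wgt s'' := by simpa [Pinv, wgt, fac] using hpin.1
            have hpv' : pv' = prev := hpv (by simp)
            have hST : bstep (BSt.run ('(' :: s2) mult pending tot prev) (pg S i)
                = BSt.run s2 (PySem.Int.floordiv mult 2)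
                    (if prev = '(' then pending + mult else pending) tot (pg S i) := by
              simp [bstep, hc2, ht]
            have hmd : PySem.Int.floordiv mult 2 = fac (pg S si) * wgt s'' := by
              rw [hm, hm'2, show fac (pg S si) * (2 * wgt s'') = 2 * (fac (pg S si) * wgt s'') by ring,
                fdiv_cancel 2 _ (by norm_num)]
            have hmd' : PySem.Int.floordiv m' 2 = wgt s'' := by
              rw [hm'2, fdiv_cancel 2 _ (by norm_num)]
            rw [hST, hmd]
            apply ih (i+1) si tot _ _ _ (pg S i) hn h2 (by omega)
            · intro h; exact absurd h ht
            · intro _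
              have hF' : List.foldl bstep (BSt.run [] 1 0 0 '?') (chars S (si+1) (i+1))
                  = bstep (BSt.run ('(' :: s'') m' p' a' pv') (pg S i) := by
                rw [chars_snoc S (by omega : si + 1 < i + 1), show i + 1 - 1 = i by ring,
                  List.foldl_append, hF]
                rfl
              by_cases hnil : s'' = []
              · refine ⟨[], PySem.Int.floordiv m' 2, 0,
                  a' + (if prev = '(' then p' + m' else p'), pg S i,
                  by simpa [hnil] using hs2', by omega, by simp, ?_, by rw [hmd'], ?_, by simp⟩
                · rw [hF']; simp [bstep, hc2, hnil, hpv']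
                · by_cases hpc : prev = '(' <;> simp [hpc, hp, hm, hnil, wgt] <;> ring
              · refine ⟨s'', PySem.Int.floordiv m' 2,
                  (if prev = '(' then p' + m' else p'), a', pg S i,
                  hs2', by omega, by simp, ?_, by rw [hmd'], ?_, by simp [hnil]⟩
                · rw [hF']; simp [bstep, hc2, hnil, hpv']
                · by_cases hpc : prev = '(' <;> simp [hpc, hp, hm] <;> ring
        · rw [if_neg hh]
          have hST : bstep (BSt.run s mult pending tot prev) (pg S i) = .dead := by
            simp [bstep, hc2, hh]
          rw [hST, foldl_bstep_dead]
          rfl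
      · rw [if_neg hc2]
        have hST : bstep (BSt.run s mult pending tot prev) (pg S i)
            = .run (pg S i :: s) (if pg S i = '(' then mult * 2 else if pg S i = '[' then mult * 3 else mult) pending tot (pg S i) := by
          simp [bstep, hc1, hc2]
        rw [hST]
        by_cases hs : s = []
        · -- s = []
          obtain ⟨hsi, hm1, hp0⟩ := h4 hs
          subst hs hsi
          apply ih (si+1) si tot _ pending _ (pg S si) hn h2 (by omega)
          · intro h; simp at h
          · intro _
            refine ⟨[], 1, 0, 0, '?', by simp, by omega, by simp, ?_, ?_, by simp [hp0], by simp⟩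
            · rw [chars_empty S le_rfl]; rfl
            · simp only [hm1, fac, List.nil_append, mul_one]
              split_ifs <;> ring
        · -- push on nonempty stack
          obtain ⟨s', m', p', a', pv', hsplit, hsii, hprev, hF, hm, hp, hpv⟩ := h5 hs
          apply ih (i+1) si tot _ pending _ (pg S i) hn h2 (by omega)
          · intro h; simp at h
          · intro _
            refine ⟨pg S i :: s',
              (if pg S i = '(' then m' * 2 else if pg S i = '[' then m' * 3 else m'),
              p', a', pg S i, by simp [hsplit], by omega, by simp, ?_, ?_, hp, by simp⟩
            · rw [chars_snoc S (by omega : si + 1 < i + 1), show i + 1 - 1 = i by ring,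
                List.foldl_append, hF]
              simp [bstep, hc1, hc2]
            · rw [hm]; split_ifs <;> ring

lemma main_eq (S : String) : ∀ (k : Nat) (start end_ total : Int) (fuel : Nat),
    (end_ - start).toNat ≤ k → (end_ - start).toNat + 1 ≤ fuel →
    dungF fuel total S start end_ = dung_alt total S start end_ := by
  intro k
  induction k with
  | zero =>
    intro start end_ total fuel hk hf
    obtain ⟨fuel, rfl⟩ : ∃ f, fuel = f + 1 := ⟨fuel - 1, by omega⟩
    rw [dungF]
    by_cases hse : start = end_
    · rw [if_pos hse, dung_alt, if_pos hse]
    · rw [if_neg hse]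
      have h0 : (end_ - start).toNat = 0 := by omega
      rw [dung_alt, if_neg hse, h0, dungLoop]
      rfl
  | succ k ihk =>
    intro start end_ total fuel hk hf
    obtain ⟨fuel, rfl⟩ : ∃ f, fuel = f + 1 := ⟨fuel - 1, by omega⟩
    rw [dungF]
    by_cases hse : start = end_
    · rw [if_pos hse, dung_alt, if_pos hse]
    · rw [if_neg hse]
      by_cases hlt : start < end_
      · have HIH : ∀ si i : Int, start ≤ si → si < i → i < end_ →
            dungF fuel 0 S (si+1) i = dung_alt 0 S (si+1) i := by
          intro si i hs hsi hie
          exact ihk (si+1) i 0 fuel (by omega) (by omega)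
        have hsim := sim S start end_ fuel HIH ((end_ - start).toNat) start start total 1 0 [] '?'
          (by push_cast; omega) le_rfl le_rfl (fun _ => ⟨rfl, rfl, rfl⟩)
          (fun h => absurd rfl h)
        rw [hsim, alt_eq S total start end_ hse]
      · have h0 : (end_ - start).toNat = 0 := by omega
        rw [dung_alt, if_neg hse, h0, dungLoop]
        rfl

-- ===== VERDICT (by name: the statement is the Claim_ definition above) =====
theorem dung_spec : Claim_equal_dung := by
  intro total S start end_ _ _
  show dung total S start end_ = dung_alt total S start end_
  exact main_eq S ((end_ - start).toNat) start end_ total _ le_rfl le_rfl
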